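-- pv_equiv track=rewrite | github.com/ppirae/Programmers | level_0/2차원으로 만들기.py | solution
-- ===== SOURCE A (Python) =====
-- from collections import deque
--
-- def solution(num_list, n):
--     q = deque(num_list)
--     cnt = 0
--     result = []
--     tmp = []
--     while q:
--         tmp.append(q.popleft())
--         cnt += 1
--         if cnt == n:
--             result.append(tmp)
--             tmp = []
--             cnt = 0
--
--     return result
-- ===== SOURCE B (Python) =====
-- def solution(num_list, n):
--     return [num_list[i:i + n] for i in range(0, len(num_list) - n + 1, n)]
-- ===== Notes on version B (the rewrite author's own statement) =====
-- stated objective: simpler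
-- what changed: A drains a deque element-by-element while maintaining a counter and a temp buffer; B is a one-line comprehension over chunk-start indices whose upper bound len(num_list)-n+1 drops the incomplete trailing chunk, slicing each row in one C-level operation.
-- outside the precondition, e.g. on solution([1, 2, 3], 0): A returns [], B raises ValueError
import Mathlib
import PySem

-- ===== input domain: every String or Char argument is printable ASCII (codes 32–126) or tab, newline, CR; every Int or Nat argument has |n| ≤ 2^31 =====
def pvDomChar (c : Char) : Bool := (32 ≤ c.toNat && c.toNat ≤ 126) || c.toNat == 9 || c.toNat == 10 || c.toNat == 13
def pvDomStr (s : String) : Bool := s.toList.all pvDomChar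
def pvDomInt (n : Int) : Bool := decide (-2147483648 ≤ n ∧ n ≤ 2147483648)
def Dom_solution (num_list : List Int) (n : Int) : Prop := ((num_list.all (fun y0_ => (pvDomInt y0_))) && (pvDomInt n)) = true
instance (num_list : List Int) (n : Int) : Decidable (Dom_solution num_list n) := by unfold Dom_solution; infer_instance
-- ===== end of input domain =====

-- B replaces A's element-by-element queue drain (deque + counter + temp buffer) with a
-- single comprehension over chunk-start indices, slicing each row directly (objective: simpler).

-- ===== PORT A =====
-- the while-loop over the deque: state = (q, cnt, result, tmp)
def solutionLoop (q : List Int) (cnt : Int) (n : Int) (result : List (List Int)) (tmp : List Int) :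
    List (List Int) :=
  match q with
  | [] => result
  | x :: qs =>
    let tmp' := tmp ++ [x]
    let cnt' := cnt + 1
    if cnt' = n then solutionLoop qs 0 n (result ++ [tmp']) []
    else solutionLoop qs cnt' n result tmp'

def solution (num_list : List Int) (n : Int) : List (List Int) :=
  solutionLoop num_list 0 n [] []

-- ===== PORT B =====
def solution_alt (num_list : List Int) (n : Int) : List (List Int) :=
  (PySem.List.pyRange 0 ((num_list.length : Int) - n + 1) n).map
    (fun i => PySem.List.slice num_list (some i) (some (i + n)))

-- ===== PRECONDITION & SPEC =====
-- Pre_ excludes only n = 0, outside the task's natural domain (a row length):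
-- A accidentally returns [] there while B's range(..., 0) raises ValueError.
def Pre_solution (num_list : List Int) (n : Int) : Prop := n ≠ 0
instance (num_list : List Int) (n : Int) : Decidable (Pre_solution num_list n) := by
  unfold Pre_solution; infer_instance

def pvWitness_solution : List Int × Int := ([1, 2, 3, 4, 5], 2)

def Spec_solution (num_list : List Int) (n : Int) (out : List (List Int)) : Prop := out = solution_alt num_list n
instance (num_list : List Int) (n : Int) (out : List (List Int)) : Decidable (Spec_solution num_list n out) := by unfold Spec_solution; infer_instance

-- ===== CLAIM (what is proved, stated in full; the proofs are below) =====
def Claim_equal_solution : Prop := ∀ (num_list : List Int) (n : Int), Dom_solution num_list n → Pre_solution num_list n → Spec_solution num_list n (solution num_list n)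

-- ===== LEMMAS AND PROOFS =====

-- the common chunk shape both programs compute for a positive n
def pvChunks (n : Nat) (xs : List Int) : List (List Int) :=
  (List.range (xs.length / n)).map (fun k => (xs.drop (n * k)).take n)

-- A's loop with n ≤ 0 never flushes: counter stays nonnegative, never equals n
lemma solutionLoop_nonpos (n : Int) (hn : n ≤ 0) :
    ∀ (q : List Int) (cnt : Int) (result : List (List Int)) (tmp : List Int),
      0 ≤ cnt → solutionLoop q cnt n result tmp = result := by
  intro q
  induction q with
  | nil => intro cnt result tmp _; rfl
  | cons x qs ih =>
    intro cnt result tmp hcnt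
    simp only [solutionLoop]
    rw [if_neg (by omega)]
    exact ih (cnt + 1) result (tmp ++ [x]) (by omega)

-- A's loop, positive n: invariant cnt = tmp.length < n; flushes exactly the full chunks of tmp ++ q
lemma solutionLoop_pos (n : Nat) (hn : 1 ≤ n) :
    ∀ (q tmp : List Int) (result : List (List Int)), tmp.length < n →
      solutionLoop q (tmp.length : Int) (n : Int) result tmp =
        result ++ pvChunks n (tmp ++ q) := by
  intro q
  induction q with
  | nil =>
    intro tmp result htmp
    simp [solutionLoop, pvChunks, Nat.div_eq_of_lt (by simpa using htmp)]
  | cons x qs ih =>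
    intro tmp result htmp
    simp only [solutionLoop]
    by_cases h : tmp.length + 1 = n
    · rw [if_pos (by exact_mod_cast h)]
      have h0 : ([] : List Int).length < n := by simpa using hn
      have hIH := ih [] (result ++ [tmp ++ [x]]) h0
      simp only [List.length_nil, Nat.cast_zero, List.nil_append] at hIH
      rw [hIH, List.append_assoc]
      congr 1
      have hlen : (tmp ++ [x]).length = n := by simp [h]
      rw [show tmp ++ x :: qs = (tmp ++ [x]) ++ qs from by simp]
      unfold pvChunks
      rw [List.length_append, hlen,
        show (n + qs.length) / n = qs.length / n + 1 from by
          rw [Nat.add_comm, Nat.add_div_right _ (by omega)],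
        List.range_succ_eq_map, List.map_cons, List.map_map, List.singleton_append]
      congr 1
      · rw [Nat.mul_zero, List.drop_zero, List.take_left' hlen]
      · apply List.map_congr_left
        intro k _
        simp only [Function.comp]
        rw [show n * Nat.succ k = n + n * k from by rw [Nat.mul_succ]; omega, ← List.drop_drop, List.drop_left' hlen]
    · rw [if_neg (by exact_mod_cast h)]
      have hlen : (tmp ++ [x]).length = tmp.length + 1 := by simp
      have := ih (tmp ++ [x]) result (by omega)
      rw [hlen] at this
      push_cast at this ⊢
      rw [this]
      congr 2
      simp

-- B for positive n computes the same chunks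
lemma solution_alt_pos (xs : List Int) (n : Nat) (hn : 1 ≤ n) :
    solution_alt xs (n : Int) = pvChunks n xs := by
  unfold solution_alt pvChunks
  rw [PySem.List.pyRange_of_pos _ _ (by exact_mod_cast hn)]
  have hcount : (if (0 : Int) < (xs.length : Int) - n + 1 then
      (((xs.length : Int) - n + 1 - 0 + n - 1) / n).toNat else 0) = xs.length / n := by
    split_ifs with h
    · have : ((xs.length : Int) - n + 1 - 0 + n - 1) = (xs.length : Int) := by ring
      rw [this, ← Int.natCast_ediv, Int.toNat_natCast]
    · have hlt : xs.length < n := by omega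
      exact (Nat.div_eq_of_lt hlt).symm
  rw [hcount, List.map_map]
  apply List.map_congr_left
  intro k _
  simp only [Function.comp, zero_add]
  have hcast : (n : Int) * (k : Int) = ((n * k : Nat) : Int) := by push_cast; ring
  rw [hcast, PySem.List.slice_natCast_add]

-- negative step, stop above start: empty range
lemma pyRange_neg_nil (a b s : Int) (hs : s < 0) (hab : a ≤ b) :
    PySem.List.pyRange a b s = [] := by
  simp [PySem.List.pyRange, show ¬ s = 0 by omega, show ¬ 0 < s by omega,
        show ¬ b < a by omega]

-- ===== VERDICT (by name: the statement is the Claim_ definition above) =====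
theorem solution_spec : Claim_equal_solution := by
  intro num_list n _ hpre
  unfold Spec_solution solution
  rcases lt_or_gt_of_ne hpre with hneg | hpos
  · rw [solutionLoop_nonpos n (by omega) num_list 0 [] [] le_rfl]
    unfold solution_alt
    rw [pyRange_neg_nil _ _ _ hneg (by omega)]
    simp
  · obtain ⟨m, rfl⟩ : ∃ m : Nat, n = (m : Int) := ⟨n.toNat, (Int.toNat_of_nonneg (by omega)).symm⟩
    have hm : 1 ≤ m := by exact_mod_cast hpos
    have := solutionLoop_pos m hm num_list [] [] (by simpa using hm)
    simp only [List.length_nil, Nat.cast_zero, List.nil_append] at this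
    rw [this, solution_alt_pos num_list m hm]
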